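-- pv_equiv track=rewrite | github.com/AkusChhabra/CPS109 | allproblemx.py | domino_cycle
-- ===== SOURCE A (Python) =====
-- def domino_cycle(tiles):
--
--   con = True
--
--   if not tiles: # Empty Tuple
--     return True
--   if tiles[0][0] != tiles[len(tiles)-1][1]: # End Case
--     return False
--
--   # Test Inner Tile Equivalence
--   for i in range(1, len(tiles)):
--       if tiles[i][0] != tiles[i-1][1]:
--         con = False
--         break
--
--   return con
-- ===== SOURCE B (Python) =====
-- def domino_cycle(tiles):
--     firsts = [t[0] for t in tiles]
--     seconds = [t[1] for t in tiles]
--     return firsts == seconds[-1:] + seconds[:-1]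
-- ===== Notes on version B (the rewrite author's own statement) =====
-- stated objective: simpler
-- what changed: Replaces A's end-case guard plus break-flag index loop with one whole-list equality: the list of first faces must equal the list of second faces rotated right by one.
import Mathlib
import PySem

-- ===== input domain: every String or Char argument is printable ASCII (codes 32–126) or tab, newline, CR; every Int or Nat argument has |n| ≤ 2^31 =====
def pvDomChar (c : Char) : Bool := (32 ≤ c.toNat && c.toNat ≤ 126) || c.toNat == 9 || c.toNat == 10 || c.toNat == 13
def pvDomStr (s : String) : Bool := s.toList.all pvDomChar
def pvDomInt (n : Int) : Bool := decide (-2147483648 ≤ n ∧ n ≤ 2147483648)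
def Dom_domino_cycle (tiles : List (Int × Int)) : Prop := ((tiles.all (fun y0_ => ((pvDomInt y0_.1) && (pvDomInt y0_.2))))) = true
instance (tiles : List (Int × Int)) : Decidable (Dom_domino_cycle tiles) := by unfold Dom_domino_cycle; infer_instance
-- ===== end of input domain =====

-- B replaces A's end-case guard plus break-flag index loop by one whole-list equality:
-- first faces must equal the second faces rotated right by one (simpler decomposition, same O(n)).

-- ===== PORT A =====
-- break-flag loop over range(1, len(tiles)); indices i and i-1 are always in range, so pyGetD is exact
def domino_cycle_loop (tiles : List (Int × Int)) : List Int → Bool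
  | [] => true
  | i :: rest =>
    if (PySem.List.pyGetD tiles i ((0:Int),(0:Int))).1 ≠ (PySem.List.pyGetD tiles (i-1) ((0:Int),(0:Int))).2 then
      false
    else domino_cycle_loop tiles rest

def domino_cycle (tiles : List (Int × Int)) : Bool :=
  if tiles.isEmpty then true
  else if (PySem.List.pyGetD tiles 0 ((0:Int),(0:Int))).1 ≠ (PySem.List.pyGetD tiles ((tiles.length : Int) - 1) ((0:Int),(0:Int))).2 then
    false
  else domino_cycle_loop tiles (PySem.List.pyRange 1 (tiles.length : Int) 1)

-- ===== PORT B =====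
def domino_cycle_alt (tiles : List (Int × Int)) : Bool :=
  let firsts := tiles.map (fun t => t.1)
  let seconds := tiles.map (fun t => t.2)
  firsts == PySem.List.slice seconds (some (-1)) none ++ PySem.List.slice seconds none (some (-1))

-- ===== PRECONDITION & SPEC =====
def Spec_domino_cycle (tiles : List (Int × Int)) (out : Bool) : Prop := out = domino_cycle_alt tiles
instance (tiles : List (Int × Int)) (out : Bool) : Decidable (Spec_domino_cycle tiles out) := by unfold Spec_domino_cycle; infer_instance

-- ===== CLAIM (what is proved, stated in full; the proofs are below) =====
def Claim_equal_domino_cycle : Prop := ∀ (tiles : List (Int × Int)), Dom_domino_cycle tiles → Spec_domino_cycle tiles (domino_cycle tiles)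

-- ===== LEMMAS AND PROOFS =====

lemma dropLast_eq_nil_of_len_le_one {α : Type} (l : List α) (h : l.length ≤ 1) : l.dropLast = [] := by
  have h2 : (l.dropLast).length = l.length - 1 := List.length_dropLast
  apply List.eq_nil_of_length_eq_zero; omega

-- the loop from index k onward compares the tail-firsts with the dropLast of the tail-seconds
lemma domino_cycle_loop_eq (tiles : List (Int × Int)) (k : ℕ) (h1 : 1 ≤ k) (h2 : k ≤ tiles.length) :
    domino_cycle_loop tiles (PySem.List.pyRange (k : Int) (tiles.length : Int) 1) =
      (((tiles.drop k).map (fun t => t.1)) == (((tiles.drop (k-1)).map (fun t => t.2)).dropLast)) := by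
  induction hn : tiles.length - k generalizing k with
  | zero =>
    have hk : k = tiles.length := by omega
    subst hk
    rw [PySem.List.pyRange_one_eq_nil (by omega)]
    have hd : tiles.drop tiles.length = [] := by simp
    simp only [domino_cycle_loop, hd, List.map_nil]
    rw [dropLast_eq_nil_of_len_le_one _ (by simp; omega)]
    simp
  | succ m ih =>
    have hk : k < tiles.length := by omega
    rw [PySem.List.pyRange_one_cons (by exact_mod_cast hk)]
    have hcast : (k : Int) + 1 = ((k+1 : ℕ) : Int) := by push_cast; ring
    have hgk : PySem.List.pyGetD tiles (k : Int) ((0:Int),(0:Int)) = tiles[k] := by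
      rw [PySem.List.pyGetD_natCast]; exact List.getD_eq_getElem _ _ hk
    have hk1 : k - 1 < tiles.length := by omega
    have hgk1 : PySem.List.pyGetD tiles ((k : Int) - 1) ((0:Int),(0:Int)) = tiles[k-1] := by
      have hc : (k : Int) - 1 = ((k - 1 : ℕ) : Int) := by
        rw [Nat.cast_sub h1]; simp
      rw [hc, PySem.List.pyGetD_natCast]; exact List.getD_eq_getElem _ _ hk1
    have hdk1 : tiles.drop (k-1) = tiles[k-1] :: tiles.drop k := by
      have hkk : k - 1 + 1 = k := by omega
      rw [List.drop_eq_getElem_cons hk1, hkk]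
    have hdk : tiles.drop k = tiles[k] :: tiles.drop (k+1) := List.drop_eq_getElem_cons hk
    rw [show domino_cycle_loop tiles ((k:Int) :: PySem.List.pyRange ((k:Int)+1) (tiles.length : Int) 1) =
        (if (PySem.List.pyGetD tiles (k:Int) ((0:Int),(0:Int))).1 ≠ (PySem.List.pyGetD tiles ((k:Int)-1) ((0:Int),(0:Int))).2 then false
         else domino_cycle_loop tiles (PySem.List.pyRange ((k:Int)+1) (tiles.length : Int) 1)) from rfl]
    rw [hgk, hgk1, hcast, ih (k+1) (by omega) (by omega) (by omega)]
    have hmapne : (List.map (fun t => t.2) (tiles.drop k)) ≠ ([] : List Int) := by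
      rw [hdk, List.map_cons]; exact List.cons_ne_nil _ _
    conv_rhs => rw [hdk1]
    rw [List.map_cons]
    rw [List.dropLast_cons_of_ne_nil hmapne]
    conv_rhs => rw [hdk]
    rw [List.map_cons, List.cons_beq_cons]
    by_cases heq : tiles[k].1 = tiles[k-1].2
    · simp [heq]
    · simp [heq]

-- nonempty list: drop (length - 1) of the seconds is the singleton of the last second
lemma drop_length_sub_one_map_snd (t : Int × Int) (rest : List (Int × Int)) :
    ((t :: rest).map (fun x => x.2)).drop (((t :: rest).map (fun x => x.2)).length - 1) =
      [((t :: rest).getLast (by simp)).2] := by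
  induction rest generalizing t with
  | nil => simp
  | cons u rs ih => simpa using ih u

theorem domino_cycle_spec : Claim_equal_domino_cycle := by
  intro tiles _
  unfold Spec_domino_cycle
  have halt : domino_cycle_alt tiles =
      ((tiles.map (fun t => t.1)) ==
        PySem.List.slice (tiles.map (fun t => t.2)) (some (-1)) none ++
        PySem.List.slice (tiles.map (fun t => t.2)) none (some (-1))) := rfl
  rw [halt, PySem.List.slice_from_neg_one, PySem.List.slice_to_neg_one]
  rcases tiles with _ | ⟨t, rest⟩
  · simp [domino_cycle]
  · have hne : (t :: rest : List (Int × Int)) ≠ [] := by simp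
    unfold domino_cycle
    simp only [List.isEmpty_cons, Bool.false_eq_true, if_false]
    rw [PySem.List.pyGetD_zero_cons]
    have hlen1 : (t :: rest : List (Int × Int)).length - 1 < (t :: rest : List (Int × Int)).length := by simp
    have hlast : PySem.List.pyGetD (t :: rest) ((((t :: rest : List (Int × Int)).length) : Int) - 1) ((0:Int),(0:Int)) =
        (t :: rest).getLast hne := by
      have hc : (((t :: rest : List (Int × Int)).length : Int) - 1) = (((t :: rest : List (Int × Int)).length - 1 : ℕ) : Int) := by
        simp
      rw [hc, PySem.List.pyGetD_natCast, List.getD_eq_getElem _ _ hlen1, List.getLast_eq_getElem hne]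
    rw [hlast, drop_length_sub_one_map_snd t rest]
    have hloop := domino_cycle_loop_eq (t :: rest) 1 (le_refl 1) (by simp)
    simp only [Nat.sub_self, List.drop_zero, List.drop_one, Nat.cast_one] at hloop
    rw [hloop]
    simp only [List.tail_cons, List.map_cons, List.cons_append, List.nil_append, List.cons_beq_cons]
    by_cases hend : t.1 = ((t :: rest).getLast hne).2
    · simp [hend]
    · simp [hend]
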